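-- pv_equiv track=rewrite | github.com/cjbbt1234/4190-A1-refactor | helper_method.py | remove_neighbors
-- ===== SOURCE A (Python) =====
-- def remove_neighbors(index, block, length):
--     """remove all neighbors cell around star
--
--     :param index: index of cell
--     :param block: the 2d list
--     :param length: length of the puzzle, 8x8 puzzle has length 8
--     :return: return the trimmed block list
--     """
--     if index % length == 1:  # left edge
--         neighbor = [index - length, index - length + 1, index + 1, index + length, index + length + 1]
--     elif index % length == 0:  # right edge
--         neighbor = [index - length, index - length - 1, index - 1, index + length, index + length - 1]
--     else:
--         neighbor = [index - length, index - length - 1, index - 1, index + length, index + length - 1,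
--                     index - length + 1,
--                     index + 1, index + length + 1]
--     for i in neighbor:
--         for j in block:
--             if i in j:
--                 j.remove(i)
--     return block
-- ===== SOURCE B (Python) =====
-- def remove_neighbors(index, block, length):
--     """remove all neighbors cell around star (one pass per row with a pending multiset)"""
--     if index % length == 1:  # left edge
--         neighbor = [index - length, index - length + 1, index + 1, index + length, index + length + 1]
--     elif index % length == 0:  # right edge
--         neighbor = [index - length, index - length - 1, index - 1, index + length, index + length - 1]
--     else:
--         neighbor = [index - length, index - length - 1, index - 1, index + length, index + length - 1,
--                     index - length + 1,
--                     index + 1, index + length + 1]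
--     for row in block:
--         pending = list(neighbor)
--         kept = []
--         for x in row:
--             if x in pending:
--                 pending.remove(x)
--             else:
--                 kept.append(x)
--         row[:] = kept
--     return block
-- ===== Notes on version B (the rewrite author's own statement) =====
-- stated objective: alternative
-- what changed: Instead of scanning every row once per neighbor with list.remove, B makes a single pass over each row with a per-row pending-removal multiset, skipping the first occurrence of each pending neighbor and keeping the rest (rows mutated in place as in A).
import Mathlib
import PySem

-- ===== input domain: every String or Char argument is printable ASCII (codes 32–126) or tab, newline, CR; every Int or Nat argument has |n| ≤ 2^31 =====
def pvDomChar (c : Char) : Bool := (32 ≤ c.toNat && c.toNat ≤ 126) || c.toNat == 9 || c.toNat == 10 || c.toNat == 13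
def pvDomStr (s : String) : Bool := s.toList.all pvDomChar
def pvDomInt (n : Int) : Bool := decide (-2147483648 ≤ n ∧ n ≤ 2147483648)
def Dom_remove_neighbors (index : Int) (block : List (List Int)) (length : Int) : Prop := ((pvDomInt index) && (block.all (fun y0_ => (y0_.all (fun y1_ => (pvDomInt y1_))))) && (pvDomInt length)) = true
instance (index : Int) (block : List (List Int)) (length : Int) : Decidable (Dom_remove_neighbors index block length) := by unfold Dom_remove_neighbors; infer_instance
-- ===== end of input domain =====

-- B replaces A's one-scan-per-neighbor removal by a single pass per row with a
-- per-row pending-removal multiset (alternative decomposition, same cost).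
-- Both A and B mutate the inner lists in place in Python; the equivalence proved
-- here is about the returned value.

-- ===== PORT A =====
-- the shared three-branch neighbor computation
def rnNeighbors (index : Int) (length : Int) : List Int :=
  if PySem.Int.mod index length = 1 then
    [index - length, index - length + 1, index + 1, index + length, index + length + 1]
  else if PySem.Int.mod index length = 0 then
    [index - length, index - length - 1, index - 1, index + length, index + length - 1]
  else
    [index - length, index - length - 1, index - 1, index + length, index + length - 1,
     index - length + 1, index + 1, index + length + 1]

-- 'if i in j: j.remove(i)' on one row
def rnStepRow (i : Int) (j : List Int) : List Int := if i ∈ j then j.erase i else j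

def remove_neighbors (index : Int) (block : List (List Int)) (length : Int) : List (List Int) :=
  (rnNeighbors index length).foldl (fun b i => b.map (fun j => rnStepRow i j)) block

-- ===== PORT B =====
-- one pass over a row: skip the first occurrence of each pending neighbor, keep the rest
def rnAltRow (pending : List Int) (row : List Int) : List Int :=
  match row with
  | [] => []
  | x :: xs => if x ∈ pending then rnAltRow (pending.erase x) xs else x :: rnAltRow pending xs

def remove_neighbors_alt (index : Int) (block : List (List Int)) (length : Int) : List (List Int) :=
  block.map (fun row => rnAltRow (rnNeighbors index length) row)

-- ===== PRECONDITION & SPEC =====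
-- Pre_ excludes length = 0, on which Python's 'index % length' raises ZeroDivisionError.
def Pre_remove_neighbors (_index : Int) (_block : List (List Int)) (length : Int) : Prop := length ≠ 0
instance (index : Int) (block : List (List Int)) (length : Int) : Decidable (Pre_remove_neighbors index block length) := by unfold Pre_remove_neighbors; infer_instance
def pvWitness_remove_neighbors : Int × List (List Int) × Int := (2, [[1, 2, 3, 5, 6], [4]], 3)

def Spec_remove_neighbors (index : Int) (block : List (List Int)) (length : Int) (out : List (List Int)) : Prop := out = remove_neighbors_alt index block length
instance (index : Int) (block : List (List Int)) (length : Int) (out : List (List Int)) : Decidable (Spec_remove_neighbors index block length out) := by unfold Spec_remove_neighbors; infer_instance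

-- ===== CLAIM (what is proved, stated in full; the proofs are below) =====
def Claim_equal_remove_neighbors : Prop := ∀ (index : Int) (block : List (List Int)) (length : Int), Dom_remove_neighbors index block length → Pre_remove_neighbors index block length → Spec_remove_neighbors index block length (remove_neighbors index block length)

-- ===== LEMMAS AND PROOFS =====

-- A's fold over neighbors, restricted to one row
def rnRowFold (ns : List Int) (row : List Int) : List Int :=
  ns.foldl (fun r i => rnStepRow i r) row

-- the outer fold of row-wise maps is a map of row-wise folds
lemma rnFold_map (ns : List Int) (block : List (List Int)) :
    ns.foldl (fun b i => b.map (fun j => rnStepRow i j)) block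
      = block.map (fun row => rnRowFold ns row) := by
  induction ns generalizing block with
  | nil => simp [rnRowFold]
  | cons n ns ih =>
      simp only [List.foldl_cons, ih, List.map_map, rnRowFold]
      rfl

-- key step: processing all neighbors against x :: xs
lemma rnRowFold_cons (ns : List Int) (x : Int) (xs : List Int) :
    rnRowFold ns (x :: xs)
      = if x ∈ ns then rnRowFold (ns.erase x) xs else x :: rnRowFold ns xs := by
  induction ns generalizing x xs with
  | nil => simp [rnRowFold]
  | cons n ns ih =>
      by_cases hnx : n = x
      · subst hnx
        simp [rnRowFold, List.foldl_cons, rnStepRow, List.erase_cons_head]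
      · have hmem : x ∈ n :: ns ↔ x ∈ ns := by
          constructor
          · intro h; rcases List.mem_cons.mp h with h | h
            · exact absurd h.symm hnx
            · exact h
          · exact fun h => List.mem_cons_of_mem _ h
        have herase : (n :: ns).erase x = n :: ns.erase x := by
          simp [hnx]
        by_cases hx : n ∈ xs
        · have hstep : rnStepRow n (x :: xs) = x :: xs.erase n := by
            simp [rnStepRow, List.mem_cons, hx, Ne.symm hnx]
          have : rnRowFold (n :: ns) (x :: xs) = rnRowFold ns (x :: xs.erase n) := by
            simp [rnRowFold, List.foldl_cons, hstep]
          rw [this, ih]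
          by_cases hxns : x ∈ ns
          · rw [if_pos hxns, if_pos (hmem.mpr hxns), herase]
            simp [rnRowFold, List.foldl_cons, rnStepRow, hx]
          · simp [hmem, hxns, rnRowFold, List.foldl_cons, rnStepRow, hx]
        · have hnx' : n ∉ x :: xs := by
            intro h; rcases List.mem_cons.mp h with h | h
            · exact hnx h
            · exact hx h
          have hstep : rnStepRow n (x :: xs) = x :: xs := by
            simp [rnStepRow, hnx']
          have : rnRowFold (n :: ns) (x :: xs) = rnRowFold ns (x :: xs) := by
            simp [rnRowFold, List.foldl_cons, hstep]
          rw [this, ih]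
          by_cases hxns : x ∈ ns
          · rw [if_pos hxns, if_pos (hmem.mpr hxns), herase]
            simp [rnRowFold, List.foldl_cons, rnStepRow, hx]
          · simp [hmem, hxns, rnRowFold, List.foldl_cons, rnStepRow, hx]

-- all neighbors against the empty row
lemma rnRowFold_nil (ns : List Int) : rnRowFold ns [] = [] := by
  induction ns with
  | nil => simp [rnRowFold]
  | cons n ns ih => simpa [rnRowFold, List.foldl_cons, rnStepRow] using ih

-- per-row agreement of the two algorithms
lemma rnRowFold_eq_altRow (ns row : List Int) :
    rnRowFold ns row = rnAltRow ns row := by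
  induction row generalizing ns with
  | nil => simp [rnRowFold_nil, rnAltRow]
  | cons x xs ih =>
      rw [rnRowFold_cons, rnAltRow]
      by_cases hx : x ∈ ns
      · simp [hx, ih]
      · simp [hx, ih]

-- ===== VERDICT (by name: the statement is the Claim_ definition above) =====
theorem remove_neighbors_spec : Claim_equal_remove_neighbors := by
  intro index block length _ _
  unfold Spec_remove_neighbors remove_neighbors remove_neighbors_alt
  rw [rnFold_map]
  simp [rnRowFold_eq_altRow]
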